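-- pv_equiv track=rewrite | github.com/KovalevRu/ITMO-University | informatics/first-lab-info/main.py | dec_to_neg_dec
-- ===== SOURCE A (Python) =====
-- def dec_to_neg_dec(decimal_number):
--
--   if decimal_number == 0:
--     return 0
--
--   result = []
--   while decimal_number != 0:
--     remainder = decimal_number % (-10)
--     decimal_number //= (-10)
--
--     if remainder < 0:
--       remainder += 10
--       decimal_number += 1
--
--     result.append(str(remainder))
--
--   return "".join(result[::-1])
-- ===== SOURCE B (Python) =====
-- def dec_to_neg_dec(decimal_number):
--     if decimal_number == 0:
--         return 0
--     return _neg_dec(decimal_number)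
--
--
-- def _neg_dec(n):
--     # digits most-significant-first, branch-free arithmetic:
--     # d = n % 10 is the next base(-10) digit, (d - n) // 10 the next quotient
--     if n == 0:
--         return ''
--     d = n % 10
--     return _neg_dec((d - n) // 10) + str(d)
-- ===== Notes on version B (the rewrite author's own statement) =====
-- stated objective: simpler
-- what changed: Replaced the loop that collects least-significant digits into a list with a sign-correction branch and then reverses/joins, by a short recursion over the quotient that builds the string most-significant-first with branch-free digit arithmetic (nonnegative remainder and exact quotient by ten) and no list or reversal.
-- outside the precondition, e.g. on dec_to_neg_dec(0): A returns 0, B returns 0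
import Mathlib
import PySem

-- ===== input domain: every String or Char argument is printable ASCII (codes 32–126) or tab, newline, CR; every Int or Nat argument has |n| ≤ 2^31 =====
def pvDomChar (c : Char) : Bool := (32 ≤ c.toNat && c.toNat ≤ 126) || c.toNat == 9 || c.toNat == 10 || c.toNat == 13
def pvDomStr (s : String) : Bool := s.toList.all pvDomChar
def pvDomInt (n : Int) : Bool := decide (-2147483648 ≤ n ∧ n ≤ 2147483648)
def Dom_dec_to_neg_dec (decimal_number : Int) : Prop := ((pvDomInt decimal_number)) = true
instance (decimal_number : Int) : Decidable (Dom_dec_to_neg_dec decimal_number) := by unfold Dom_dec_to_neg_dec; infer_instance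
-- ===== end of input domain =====

-- B replaces A's collect-digits-then-reverse loop by a recursion over the quotient that
-- builds the string most-significant-first with branch-free digit arithmetic (simpler).

-- ===== PORT A =====
-- A's while loop; fuel only makes the recursion structural (2*|n|+2 always suffices,
-- the loop itself stops when n becomes 0)
def decAuxA : Nat → Int → List String → List String
  | 0, _, result => result
  | fuel + 1, n, result =>
    if n = 0 then result
    else
      let remainder := PySem.Int.mod n (-10)
      let n1 := PySem.Int.floordiv n (-10)
      if remainder < 0 then
        decAuxA fuel (n1 + 1) (result ++ [PySem.Int.toStr (remainder + 10)])
      else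
        decAuxA fuel n1 (result ++ [PySem.Int.toStr remainder])

-- Python A returns the int 0 on input 0 (not a String); that input is outside Pre_,
-- and the "0" in this branch is a placeholder of the right type.
def dec_to_neg_dec (decimal_number : Int) : String :=
  if decimal_number = 0 then "0"
  else
    PySem.Str.join ""
      ((PySem.List.slice? (decAuxA (2 * decimal_number.natAbs + 2) decimal_number [])
          none none (-1)).getD [])

-- ===== PORT B =====
-- Source B's _neg_dec; string concatenation ported on List Char (String.ofList at the top);
-- fuel only makes the recursion structural (2*|n|+2 always suffices)
def negDigits : Nat → Int → List Char
  | 0, _ => []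
  | fuel + 1, n =>
    if n = 0 then []
    else
      let d := PySem.Int.mod n 10
      negDigits fuel (PySem.Int.floordiv (d - n) 10) ++ PySem.Int.toChars d

def dec_to_neg_dec_alt (decimal_number : Int) : String :=
  if decimal_number = 0 then "0"   -- Python B returns the int 0 here (outside Pre_); placeholder of the right type
  else String.ofList (negDigits (2 * decimal_number.natAbs + 2) decimal_number)

-- ===== PRECONDITION & SPEC =====
-- Pre_ excludes only input 0, on which Python A (and B) return the int 0, not a String.
def Pre_dec_to_neg_dec (decimal_number : Int) : Prop := decimal_number ≠ 0
instance (decimal_number : Int) : Decidable (Pre_dec_to_neg_dec decimal_number) := by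
  unfold Pre_dec_to_neg_dec; infer_instance

def pvWitness_dec_to_neg_dec : Int := (-17)

def Spec_dec_to_neg_dec (decimal_number : Int) (out : String) : Prop := out = dec_to_neg_dec_alt decimal_number
instance (decimal_number : Int) (out : String) : Decidable (Spec_dec_to_neg_dec decimal_number out) := by unfold Spec_dec_to_neg_dec; infer_instance

-- ===== CLAIM (what is proved, stated in full; the proofs are below) =====
def Claim_equal_dec_to_neg_dec : Prop := ∀ (decimal_number : Int), Dom_dec_to_neg_dec decimal_number → Pre_dec_to_neg_dec decimal_number → Spec_dec_to_neg_dec decimal_number (dec_to_neg_dec decimal_number)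

-- ===== LEMMAS AND PROOFS =====

theorem joinNil_cons (x : List Char) (xs : List (List Char)) :
    PySem.Chars.join [] (x :: xs) = x ++ PySem.Chars.join [] xs := by
  cases xs with
  | nil => simp [PySem.Chars.join_singleton, PySem.Chars.join_nil]
  | cons y ys => simp [PySem.Chars.join_cons_cons]

-- A's corrected step equals B's branch-free step: for n ≠ 0, the digit appended is
-- PySem.Int.mod n 10 and the next value of n is PySem.Int.floordiv (mod n 10 - n) 10.
theorem stepA_eq (fuel : Nat) (n : Int) (hn : n ≠ 0) (result : List String) :
    decAuxA (fuel + 1) n result =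
      decAuxA fuel (PySem.Int.floordiv (PySem.Int.mod n 10 - n) 10)
        (result ++ [PySem.Int.toStr (PySem.Int.mod n 10)]) := by
  have h1 := PySem.Int.floordiv_mul_add_mod n (-10)
  have h2 := PySem.Int.mod_neg_bounds n (b := -10) (by norm_num)
  have h3 := PySem.Int.floordiv_mul_add_mod n 10
  have h4 := PySem.Int.mod_nonneg n (b := 10) (by norm_num)
  have h5 := PySem.Int.mod_lt n (b := 10) (by norm_num)
  have h6 := PySem.Int.floordiv_mul_add_mod (PySem.Int.mod n 10 - n) 10
  have h7 := PySem.Int.mod_nonneg (PySem.Int.mod n 10 - n) (b := 10) (by norm_num)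
  have h8 := PySem.Int.mod_lt (PySem.Int.mod n 10 - n) (b := 10) (by norm_num)
  rw [decAuxA]
  simp only [hn, if_false]
  split_ifs with hr
  · have hd : PySem.Int.mod n (-10) + 10 = PySem.Int.mod n 10 := by omega
    have hq : PySem.Int.floordiv n (-10) + 1 =
        PySem.Int.floordiv (PySem.Int.mod n 10 - n) 10 := by omega
    rw [hd, hq]
  · have hd : PySem.Int.mod n (-10) = PySem.Int.mod n 10 := by omega
    have hq : PySem.Int.floordiv n (-10) =
        PySem.Int.floordiv (PySem.Int.mod n 10 - n) 10 := by omega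
    rw [hd, hq]

theorem loop_eq (fuel : Nat) : ∀ (n : Int),
    2 * n.natAbs + (if n < 0 then 1 else 0) < fuel → ∀ (acc : List String),
    PySem.Chars.join [] ((decAuxA fuel n acc).reverse.map String.toList) =
      negDigits fuel n ++ PySem.Chars.join [] (acc.reverse.map String.toList) := by
  induction fuel with
  | zero => intro n hn; omega
  | succ fuel ih =>
      intro n hn acc
      by_cases h0 : n = 0
      · subst h0; rw [decAuxA, negDigits]; simp
      · have h1 := PySem.Int.floordiv_mul_add_mod n 10
        have h4 := PySem.Int.mod_nonneg n (b := 10) (by norm_num)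
        have h5 := PySem.Int.mod_lt n (b := 10) (by norm_num)
        have h6 := PySem.Int.floordiv_mul_add_mod (PySem.Int.mod n 10 - n) 10
        have h7 := PySem.Int.mod_nonneg (PySem.Int.mod n 10 - n) (b := 10) (by norm_num)
        have h8 := PySem.Int.mod_lt (PySem.Int.mod n 10 - n) (b := 10) (by norm_num)
        have hlt : 2 * (PySem.Int.floordiv (PySem.Int.mod n 10 - n) 10).natAbs +
            (if PySem.Int.floordiv (PySem.Int.mod n 10 - n) 10 < 0 then 1 else 0) < fuel := by
          split_ifs at hn ⊢ <;> omega
        rw [stepA_eq fuel n h0]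
        rw [ih _ hlt]
        conv_rhs => rw [negDigits]
        simp only [h0, if_false]
        rw [List.reverse_append, List.reverse_singleton, List.singleton_append,
            List.map_cons, joinNil_cons, PySem.Int.toList_toStr, List.append_assoc]

-- ===== VERDICT (by name: the statement is the Claim_ definition above) =====
theorem dec_to_neg_dec_spec : Claim_equal_dec_to_neg_dec := by
  intro n _ hpre
  unfold Spec_dec_to_neg_dec dec_to_neg_dec dec_to_neg_dec_alt
  have hpre' : n ≠ 0 := hpre
  simp only [hpre', if_false]
  rw [PySem.List.slice?_none_none_neg_one, Option.getD_some]
  rw [← String.toList_inj, PySem.Str.toList_join, String.toList_ofList]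
  have h := loop_eq (2 * n.natAbs + 2) n (by split_ifs <;> omega) []
  simpa [PySem.Chars.join_nil] using h
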